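-- pv_equiv track=rewrite | github.com/sunilsoni/interview-notes-python | com/interview/2025/feb/visa/test1/check_pattern.py | solution
-- ===== SOURCE A (Python) =====
-- def check_pattern(matrix, start_i, start_j, di, dj, rows, cols):
--     """
--     Check diagonal pattern starting from given position and direction
--     Returns length of valid pattern if pattern ends at border, 0 otherwise
--     """
--     if matrix[start_i][start_j] != 1:  # Must start with 1
--         return 0
--
--     length = 1
--     i, j = start_i + di, start_j + dj
--     expect_two = True  # After 1, expect 2
--
--     while 0 <= i < rows and 0 <= j < cols:
--         current = matrix[i][j]
--         if expect_two:
--             if current != 2: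
--                 break
--             expect_two = False
--         else:
--             if current != 0:
--                 break
--             expect_two = True
--
--         length += 1
--         i += di
--         j += dj
--
--     # Check if we reached a border
--     if i < 0 or i >= rows or j < 0 or j >= cols:
--         return length
--     return 0
--
-- def solution(matrix):
--     if not matrix or not matrix[0]:
--         return 0
--
--     rows = len(matrix)
--     cols = len(matrix[0])
--     max_length = 0
--
--     # Diagonal directions: up-right, up-left, down-right, down-left
--     directions = [(-1, 1), (-1, -1), (1, 1), (1, -1)]
--
--     # Check from each starting position
--     for i in range(rows):
--         for j in range(cols):
--             for di, dj in directions: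
--                 length = check_pattern(matrix, i, j, di, dj, rows, cols)
--                 max_length = max(max_length, length)
--
--     return max_length
-- ===== SOURCE B (Python) =====
-- def solution(matrix):
--     if not matrix or not matrix[0]:
--         return 0
--     rows, cols = len(matrix), len(matrix[0])
--     best = 0
--     for di, dj in [(-1, 1), (-1, -1), (1, 1), (1, -1)]:
--         # dp[i][j] = length of the alternating run from (i,j) along (di,dj) up to the
--         # border (counting (i,j)), or 0 if the run dies before the border; it depends
--         # only on the single cell (i+di, j+dj), so sweep rows from the border inward
--         # keeping just the previous row's dp values.
--         order = range(rows) if di < 0 else range(rows - 1, -1, -1)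
--         prev_dp = None    # dp values of row i + di, or None when that row is off the grid
--         prev_row = None   # matrix[i + di]
--         for i in order:
--             row = matrix[i]
--             cur = []
--             for j in range(cols):
--                 nj = j + dj
--                 if prev_dp is None or nj < 0 or nj >= cols:
--                     d = 1
--                 else:
--                     t = prev_dp[nj]
--                     d = 1 + t if (prev_row[nj] == (0 if row[j] == 2 else 2) and t > 0) else 0
--                 cur.append(d)
--                 if row[j] == 1 and d > best:
--                     best = d
--             prev_dp, prev_row = cur, row
--     return best
-- ===== Notes on version B (the rewrite author's own statement) =====
-- stated objective: alternative
-- what changed: A restarts a fresh diagonal walk from every cell for every direction; B instead does, per direction, one border-inward row sweep that derives each cell's run-length-to-border from the single neighbouring cell computed in the previous row (two-row DP), so the inner per-start walk disappears (O(R*C) worst case vs A's O(R*C*min(R,C)); measured ~1.7x at the largest size but not consistently >=1.5x per input, so not claimed as faster).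
import Mathlib
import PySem

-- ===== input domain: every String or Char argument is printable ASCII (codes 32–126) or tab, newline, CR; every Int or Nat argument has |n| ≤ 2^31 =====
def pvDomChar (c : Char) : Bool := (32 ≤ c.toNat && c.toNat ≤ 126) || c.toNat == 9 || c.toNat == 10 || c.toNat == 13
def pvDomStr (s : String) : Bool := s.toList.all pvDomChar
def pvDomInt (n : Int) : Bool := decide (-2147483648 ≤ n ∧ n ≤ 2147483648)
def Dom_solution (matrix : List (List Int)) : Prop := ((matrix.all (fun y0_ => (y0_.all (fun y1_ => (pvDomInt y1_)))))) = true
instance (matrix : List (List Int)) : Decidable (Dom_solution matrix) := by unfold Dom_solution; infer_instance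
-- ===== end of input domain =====

-- B replaces A's per-start diagonal walks by one border-inward two-row DP sweep per direction
-- (a different algorithm; the per-start inner walk disappears); the equivalence is about
-- return values only (neither program mutates its argument).

-- ===== PORT A =====
-- shared total indexing helper: matrix[i][j] for the 0 ≤ i, 0 ≤ j accesses both programs make
def getRow (l : List Int) (k : Int) : Int := l.getD k.toNat 0
def getCell (m : List (List Int)) (i j : Int) : Int := getRow (m.getD i.toNat []) j

-- the while loop of check_pattern; fuel (rows+cols).toNat+1 bounds its iterations (|di| = 1 at every call site)
def loopA (m : List (List Int)) (di dj rows cols : Int) : Nat → Int → Int → Int → Bool → Int × Int × Int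
  | 0, len, i, j, _ => (len, i, j)
  | f+1, len, i, j, e =>
    if 0 ≤ i ∧ i < rows ∧ 0 ≤ j ∧ j < cols then
      let cur := getCell m i j
      if e then
        if cur ≠ 2 then (len, i, j) else loopA m di dj rows cols f (len+1) (i+di) (j+dj) false
      else
        if cur ≠ 0 then (len, i, j) else loopA m di dj rows cols f (len+1) (i+di) (j+dj) true
    else (len, i, j)

def checkPattern (m : List (List Int)) (si sj di dj rows cols : Int) : Int :=
  if getCell m si sj ≠ 1 then 0
  else
    let r := loopA m di dj rows cols ((rows + cols).toNat + 1) 1 (si + di) (sj + dj) true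
    if r.2.1 < 0 ∨ rows ≤ r.2.1 ∨ r.2.2 < 0 ∨ cols ≤ r.2.2 then r.1 else 0

def solution (matrix : List (List Int)) : Int :=
  match matrix with
  | [] => 0
  | r0 :: _ =>
    if r0 = [] then 0
    else
      let rows : Int := matrix.length
      let cols : Int := r0.length
      (PySem.List.pyRange 0 rows 1).foldl (fun best i =>
        (PySem.List.pyRange 0 cols 1).foldl (fun best j =>
          ([((-1 : Int), (1 : Int)), (-1, -1), (1, 1), (1, -1)]).foldl (fun best d =>
            max best (checkPattern matrix i j d.1 d.2 rows cols)) best) best) 0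

-- ===== PORT B =====
-- inner loop over j of Source B: state is (cur, best)
def innerStepB (cols dj : Int) (row : List Int) (prev : Option (List Int × List Int))
    (st : List Int × Int) (j : Int) : List Int × Int :=
  match st with
  | (cur0, best0) =>
    let nj := j + dj
    let d : Int :=
      match prev with
      | none => 1
      | some (pd, pr) =>
        if nj < 0 ∨ cols ≤ nj then 1
        else
          let t := getRow pd nj
          if getRow pr nj = (if getRow row j = 2 then 0 else 2) ∧ 0 < t then 1 + t else 0
    let cur := cur0 ++ [d]
    let best := if getRow row j = 1 ∧ best0 < d then d else best0
    (cur, best)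

-- body of the row loop: state is (best, prev_dp/prev_row)
def rowStepB (m : List (List Int)) (cols dj : Int)
    (st : Int × Option (List Int × List Int)) (i : Int) : Int × Option (List Int × List Int) :=
  match st with
  | (best0, prev) =>
    let row := m.getD i.toNat []
    let r := (PySem.List.pyRange 0 cols 1).foldl (innerStepB cols dj row prev) ([], best0)
    (r.2, some (r.1, row))

def dirB (m : List (List Int)) (rows cols di dj : Int) (best0 : Int) : Int :=
  let order := if di < 0 then PySem.List.pyRange 0 rows 1 else PySem.List.pyRange (rows - 1) (-1) (-1)
  (order.foldl (rowStepB m cols dj) (best0, none)).1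

def solution_alt (matrix : List (List Int)) : Int :=
  match matrix with
  | [] => 0
  | r0 :: _ =>
    if r0 = [] then 0
    else
      let rows : Int := matrix.length
      let cols : Int := r0.length
      ([((-1 : Int), (1 : Int)), (-1, -1), (1, 1), (1, -1)]).foldl
        (fun best d => dirB matrix rows cols d.1 d.2 best) 0

-- ===== PRECONDITION & SPEC =====
-- Pre_ excludes exactly the ragged matrices on which Python A raises IndexError
-- (some row shorter than the first row: matrix[i][j] is read for every j < len(matrix[0])).
def Pre_solution (matrix : List (List Int)) : Prop :=
  ∀ row ∈ matrix, (matrix.headD []).length ≤ row.length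
instance (matrix : List (List Int)) : Decidable (Pre_solution matrix) := by
  unfold Pre_solution; infer_instance

def pvWitness_solution : List (List Int) := [[1, 2], [2, 0]]

def Spec_solution (matrix : List (List Int)) (out : Int) : Prop := out = solution_alt matrix
instance (matrix : List (List Int)) (out : Int) : Decidable (Spec_solution matrix out) := by unfold Spec_solution; infer_instance

-- ===== CLAIM (what is proved, stated in full; the proofs are below) =====
def Claim_equal_solution : Prop := ∀ (matrix : List (List Int)), Dom_solution matrix → Pre_solution matrix → Spec_solution matrix (solution matrix)

-- ===== LEMMAS AND PROOFS =====

-- V E i j: entering the while loop at (i,j) expecting value E: 1 + number of matched cells if the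
-- walk exits the grid, else 0.  Fuel-indexed; stable once fuel ≥ needF.
def Vf (m : List (List Int)) (rows cols di dj : Int) : Nat → Int → Int → Int → Int
  | 0, _, _, _ => 0
  | f+1, E, i, j =>
    if 0 ≤ i ∧ i < rows ∧ 0 ≤ j ∧ j < cols then
      if getCell m i j = E then
        let v := Vf m rows cols di dj f (if E = 2 then 0 else 2) (i+di) (j+dj)
        if v = 0 then 0 else v + 1
      else 0
    else 1

def needF (di rows i : Int) : Nat := (if di = 1 then rows - i else i + 1).toNat + 1

def FUEL (rows cols : Int) : Nat := (rows + cols).toNat + 1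

def dpV (m : List (List Int)) (rows cols di dj i j : Int) : Int :=
  Vf m rows cols di dj (FUEL rows cols) (if getCell m i j = 2 then 0 else 2) (i+di) (j+dj)

def contrib (m : List (List Int)) (rows cols di dj i j : Int) : Int :=
  if getCell m i j = 1 then dpV m rows cols di dj i j else 0

def isup {α : Type} (f : α → Int) (L : List α) : Int := L.foldr (fun x b => max (f x) b) 0

theorem Vf_nonneg (m : List (List Int)) (rows cols di dj : Int) (f : Nat) :
    ∀ (E i j : Int), 0 ≤ Vf m rows cols di dj f E i j := by
  induction f with
  | zero => intro E i j; simp [Vf]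
  | succ f ih =>
    intro E i j
    simp only [Vf]
    have h0 := ih 0 (i+di) (j+dj)
    have h2 := ih 2 (i+di) (j+dj)
    split_ifs <;> omega

theorem Vf_stable (m : List (List Int)) (rows cols di dj : Int)
    (hdi : di = 1 ∨ di = -1) :
    ∀ (f g : Nat) (E i j : Int), needF di rows i ≤ f → needF di rows i ≤ g →
      Vf m rows cols di dj f E i j = Vf m rows cols di dj g E i j := by
  intro f
  induction f with
  | zero => intro g E i j hf; exact absurd hf (by simp [needF])
  | succ f ih =>
    intro g E i j hf hg
    obtain ⟨g, rfl⟩ : ∃ g', g = g' + 1 := ⟨g - 1, by unfold needF at hg; omega⟩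
    simp only [Vf]
    by_cases h1 : 0 ≤ i ∧ i < rows ∧ 0 ≤ j ∧ j < cols
    · have hnf : needF di rows (i+di) ≤ f := by
        rcases hdi with rfl | rfl <;> (unfold needF at *; omega)
      have hng : needF di rows (i+di) ≤ g := by
        rcases hdi with rfl | rfl <;> (unfold needF at *; omega)
      simp only [if_pos h1, ih g (if E = 2 then 0 else 2) (i+di) (j+dj) hnf hng]
    · simp only [if_neg h1]

theorem Vf_sufficient (rows cols di si : Int) (hdi : di = 1 ∨ di = -1)
    (hsi : 0 ≤ si) (hsi2 : si < rows) (hcols : 0 ≤ cols) :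
    needF di rows (si + di) ≤ FUEL rows cols := by
  rcases hdi with rfl | rfl <;> (unfold needF FUEL; omega)

-- the while loop agrees with Vf
theorem loopA_eq_Vf (m : List (List Int)) (rows cols di dj : Int) (hdi : di = 1 ∨ di = -1) :
    ∀ (f : Nat) (len i j : Int) (e : Bool), needF di rows i ≤ f →
      (if (loopA m di dj rows cols f len i j e).2.1 < 0 ∨ rows ≤ (loopA m di dj rows cols f len i j e).2.1
          ∨ (loopA m di dj rows cols f len i j e).2.2 < 0 ∨ cols ≤ (loopA m di dj rows cols f len i j e).2.2
       then (loopA m di dj rows cols f len i j e).1 else 0)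
      = (if Vf m rows cols di dj f (if e then 2 else 0) i j = 0 then 0
         else len + Vf m rows cols di dj f (if e then 2 else 0) i j - 1) := by
  intro f
  induction f with
  | zero => intro len i j e hf; exact absurd hf (by simp [needF])
  | succ f ih =>
    intro len i j e hf
    by_cases h1 : 0 ≤ i ∧ i < rows ∧ 0 ≤ j ∧ j < cols
    · have hnf : needF di rows (i+di) ≤ f := by
        rcases hdi with rfl | rfl <;> (unfold needF at *; omega)
      cases e with
      | true =>
        simp only [show ((true = true) = True) from by simp, if_true]
        by_cases h2 : getCell m i j = 2
        · have hL : loopA m di dj rows cols (f+1) len i j true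
              = loopA m di dj rows cols f (len+1) (i+di) (j+dj) false := by
            simp [loopA, h1, h2]
          have hV : Vf m rows cols di dj (f+1) 2 i j
              = (if Vf m rows cols di dj f 0 (i+di) (j+dj) = 0 then 0
                 else Vf m rows cols di dj f 0 (i+di) (j+dj) + 1) := by
            simp [Vf, h1, h2]
          have hrec := ih (len+1) (i+di) (j+dj) false hnf
          simp only [show ((false = true) = False) from by simp, if_false] at hrec
          rw [hL, hrec, hV]
          have := Vf_nonneg m rows cols di dj f 0 (i+di) (j+dj)
          split_ifs <;> omega
        · have hL : loopA m di dj rows cols (f+1) len i j true = (len, i, j) := by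
            simp [loopA, h1, h2]
          have hV : Vf m rows cols di dj (f+1) 2 i j = 0 := by
            simp [Vf, h1, h2]
          have hnb : ¬((len,i,j).2.1 < 0 ∨ rows ≤ (len,i,j).2.1 ∨ (len,i,j).2.2 < 0 ∨ cols ≤ (len,i,j).2.2) := by
            show ¬(i < 0 ∨ rows ≤ i ∨ j < 0 ∨ cols ≤ j)
            omega
          rw [hL, hV, if_neg hnb, if_pos rfl]
      | false =>
        simp only [show ((false = true) = False) from by simp, if_false]
        by_cases h2 : getCell m i j = 0
        · have hL : loopA m di dj rows cols (f+1) len i j false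
              = loopA m di dj rows cols f (len+1) (i+di) (j+dj) true := by
            simp [loopA, h1, h2]
          have hV : Vf m rows cols di dj (f+1) 0 i j
              = (if Vf m rows cols di dj f 2 (i+di) (j+dj) = 0 then 0
                 else Vf m rows cols di dj f 2 (i+di) (j+dj) + 1) := by
            simp [Vf, h1, h2]
          have hrec := ih (len+1) (i+di) (j+dj) true hnf
          simp only [show ((true = true) = True) from by simp, if_true] at hrec
          rw [hL, hrec, hV]
          have := Vf_nonneg m rows cols di dj f 2 (i+di) (j+dj)
          split_ifs <;> omega
        · have hL : loopA m di dj rows cols (f+1) len i j false = (len, i, j) := by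
            simp [loopA, h1, h2]
          have hV : Vf m rows cols di dj (f+1) 0 i j = 0 := by
            simp [Vf, h1, h2]
          have hnb : ¬((len,i,j).2.1 < 0 ∨ rows ≤ (len,i,j).2.1 ∨ (len,i,j).2.2 < 0 ∨ cols ≤ (len,i,j).2.2) := by
            show ¬(i < 0 ∨ rows ≤ i ∨ j < 0 ∨ cols ≤ j)
            omega
          rw [hL, hV, if_neg hnb, if_pos rfl]
    · have hL : loopA m di dj rows cols (f+1) len i j e = (len, i, j) := by
        cases e <;> simp [loopA, h1]
      have hV : Vf m rows cols di dj (f+1) (if e then 2 else 0) i j = 1 := by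
        simp [Vf, h1]
      have hb : ((len,i,j).2.1 < 0 ∨ rows ≤ (len,i,j).2.1 ∨ (len,i,j).2.2 < 0 ∨ cols ≤ (len,i,j).2.2) := by
        show i < 0 ∨ rows ≤ i ∨ j < 0 ∨ cols ≤ j
        omega
      rw [hL, hV, if_pos hb, if_neg (by omega : ¬(1:Int) = 0)]
      omega

theorem checkPattern_eq (m : List (List Int)) (rows cols di dj si sj : Int)
    (hdi : di = 1 ∨ di = -1) (hsi : 0 ≤ si) (hsi2 : si < rows) (hcols : 0 ≤ cols) :
    checkPattern m si sj di dj rows cols = contrib m rows cols di dj si sj := by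
  unfold checkPattern contrib dpV
  by_cases h : getCell m si sj = 1
  · have hE : (if getCell m si sj = 2 then (0:Int) else 2) = 2 := by rw [h]; norm_num
    simp only [h, ne_eq, not_true_eq_false, if_false]
    have hrec := loopA_eq_Vf m rows cols di dj hdi (FUEL rows cols) 1 (si+di) (sj+dj) true
      (Vf_sufficient rows cols di si hdi hsi hsi2 hcols)
    simp only [FUEL] at hrec
    rw [hrec]
    have := Vf_nonneg m rows cols di dj ((rows+cols).toNat+1) 2 (si+di) (sj+dj)
    unfold FUEL
    split_ifs <;> omega
  · simp [h]

-- dp recurrence: dpV at (i,j) from dpV at (i+di, j+dj)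
theorem dpV_rec (m : List (List Int)) (rows cols di dj i j : Int)
    (hdi : di = 1 ∨ di = -1) (hi : 0 ≤ i) (hi2 : i < rows) (hcols : 0 ≤ cols) :
    dpV m rows cols di dj i j =
      if 0 ≤ i+di ∧ i+di < rows ∧ 0 ≤ j+dj ∧ j+dj < cols then
        (if getCell m (i+di) (j+dj) = (if getCell m i j = 2 then 0 else 2)
            ∧ 0 < dpV m rows cols di dj (i+di) (j+dj)
         then 1 + dpV m rows cols di dj (i+di) (j+dj) else 0)
      else 1 := by
  unfold dpV FUEL
  rw [show Vf m rows cols di dj ((rows+cols).toNat+1) (if getCell m i j = 2 then (0:Int) else 2) (i+di) (j+dj)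
      = (if 0 ≤ i+di ∧ i+di < rows ∧ 0 ≤ j+dj ∧ j+dj < cols then
          (if getCell m (i+di) (j+dj) = (if getCell m i j = 2 then (0:Int) else 2) then
            (if Vf m rows cols di dj ((rows+cols).toNat)
                  (if (if getCell m i j = 2 then (0:Int) else 2) = 2 then (0:Int) else 2)
                  (i+di+di) (j+dj+dj) = 0 then 0
             else Vf m rows cols di dj ((rows+cols).toNat)
                  (if (if getCell m i j = 2 then (0:Int) else 2) = 2 then (0:Int) else 2)
                  (i+di+di) (j+dj+dj) + 1)
          else 0)
        else 1) from rfl]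
  by_cases hb : 0 ≤ i+di ∧ i+di < rows ∧ 0 ≤ j+dj ∧ j+dj < cols
  · simp only [if_pos hb]
    by_cases hm : getCell m (i+di) (j+dj) = (if getCell m i j = 2 then 0 else 2)
    · simp only [if_pos hm]
      have hEE : (if getCell m (i+di) (j+dj) = 2 then (0:Int) else 2)
          = (if (if getCell m i j = 2 then (0:Int) else 2) = 2 then (0:Int) else 2) := by
        rw [hm]
      have hst : Vf m rows cols di dj ((rows+cols).toNat)
            (if (if getCell m i j = 2 then (0:Int) else 2) = 2 then (0:Int) else 2) (i+di+di) (j+dj+dj)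
          = Vf m rows cols di dj ((rows+cols).toNat+1)
            (if getCell m (i+di) (j+dj) = 2 then (0:Int) else 2) (i+di+di) (j+dj+dj) := by
        rw [hEE]
        exact Vf_stable m rows cols di dj hdi ((rows+cols).toNat) ((rows+cols).toNat+1) _
          (i+di+di) (j+dj+dj)
          (by rcases hdi with rfl | rfl <;> simp [needF] <;> omega)
          (by rcases hdi with rfl | rfl <;> simp [needF] <;> omega)
      rw [hst]
      have hnn := Vf_nonneg m rows cols di dj ((rows+cols).toNat+1)
        (if getCell m (i+di) (j+dj) = 2 then (0:Int) else 2) (i+di+di) (j+dj+dj)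
      by_cases hp : (0:Int) < Vf m rows cols di dj ((rows+cols).toNat+1)
          (if getCell m (i+di) (j+dj) = 2 then (0:Int) else 2) (i+di+di) (j+dj+dj)
      · rw [if_neg (by omega : ¬ Vf m rows cols di dj ((rows+cols).toNat+1)
            (if getCell m (i+di) (j+dj) = 2 then (0:Int) else 2) (i+di+di) (j+dj+dj) = 0),
          if_pos (show _ ∧ _ from ⟨hm, hp⟩)]
        omega
      · rw [if_pos (by omega : Vf m rows cols di dj ((rows+cols).toNat+1)
            (if getCell m (i+di) (j+dj) = 2 then (0:Int) else 2) (i+di+di) (j+dj+dj) = 0),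
          if_neg (show ¬(_ ∧ _) from fun hh => hp hh.2)]
    · simp only [if_neg hm]
      rw [if_neg (by intro hh; exact hm hh.1)]
  · simp only [if_neg hb]

-- ===== max-fold machinery =====
theorem isup_nonneg {α : Type} (f : α → Int) (L : List α) : 0 ≤ isup f L := by
  induction L with
  | nil => simp [isup]
  | cons a L ih => simp only [isup, List.foldr] at *; omega

theorem isup_cons {α : Type} (f : α → Int) (a : α) (L : List α) :
    isup f (a :: L) = max (f a) (isup f L) := rfl

theorem foldl_max_general {α : Type} (step : Int → α → Int) (f : α → Int) :
    ∀ (L : List α), (∀ b x, x ∈ L → 0 ≤ b → step b x = max b (f x)) →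
    ∀ a, 0 ≤ a → L.foldl step a = max a (isup f L) := by
  intro L
  induction L with
  | nil => intro h a ha; simp only [List.foldl, isup, List.foldr]; omega
  | cons x L ih =>
    intro h a ha
    simp only [List.foldl, isup_cons]
    rw [h a x (by simp) ha, ih (fun b y hy hb => h b y (by simp [hy]) hb) _ (by omega)]
    omega

theorem isup_congr {α : Type} (f g : α → Int) (L : List α) (h : ∀ x ∈ L, f x = g x) :
    isup f L = isup g L := by
  induction L with
  | nil => rfl
  | cons a L ih =>
    simp only [isup_cons, h a (by simp), ih (fun x hx => h x (by simp [hx]))]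

theorem isup_append {α : Type} (f : α → Int) (L1 L2 : List α) :
    isup f (L1 ++ L2) = max (isup f L1) (isup f L2) := by
  induction L1 with
  | nil =>
    have := isup_nonneg f L2
    simp only [List.nil_append]
    rw [show isup f ([] : List α) = 0 from rfl]
    omega
  | cons a L ih => simp only [List.cons_append, isup_cons, ih]; omega

theorem isup_reverse {α : Type} (f : α → Int) (L : List α) :
    isup f L.reverse = isup f L := by
  induction L with
  | nil => rfl
  | cons a L ih =>
    rw [List.reverse_cons, isup_append, ih, show isup f [a] = max (f a) 0 from rfl, isup_cons]
    have hL := isup_nonneg f L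
    rcases le_total (f a) 0 with h | h
    · rw [max_eq_right h, max_eq_left hL, max_eq_right (le_trans h hL)]
    · rw [max_eq_left h]
      exact max_comm _ _

theorem isup_max_distrib {α : Type} (p q : α → Int) (L : List α) :
    isup (fun x => max (p x) (q x)) L = max (isup p L) (isup q L) := by
  induction L with
  | nil => simp [isup]
  | cons a L ih => simp only [isup_cons, ih]; omega

theorem isup_zero {α : Type} (L : List α) : isup (fun _ : α => (0:Int)) L = 0 := by
  induction L with
  | nil => rfl
  | cons a L ih => simp [isup_cons, ih]

theorem isup_swap {α β : Type} (g : α → β → Int) (L1 : List α) (L2 : List β) :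
    isup (fun x => isup (g x) L2) L1 = isup (fun y => isup (fun x => g x y) L1) L2 := by
  induction L1 with
  | nil => exact (isup_zero (α := β) L2).symm
  | cons a L ih =>
    simp only [isup_cons, ih, ← isup_max_distrib]

-- ===== B-side proofs =====
theorem getRow_map (f : Int → Int) (n j : Int) (h0 : 0 ≤ j) (hn : j < n) :
    getRow ((PySem.List.pyRange 0 n 1).map f) j = f j := by
  have h := PySem.List.pyGetD_map_pyRange_of_nonneg f n j 0 h0 hn
  rw [← h]
  exact (PySem.List.pyGetD_of_nonneg _ 0 h0).symm

def Hprev (m : List (List Int)) (rows cols di dj i : Int)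
    (prev : Option (List Int × List Int)) : Prop :=
  (prev = none ∧ ¬(0 ≤ i+di ∧ i+di < rows)) ∨
  (∃ pd, prev = some (pd, m.getD (i+di).toNat []) ∧ (0 ≤ i+di ∧ i+di < rows) ∧
     ∀ j : Int, 0 ≤ j → j < cols → getRow pd j = dpV m rows cols di dj (i+di) j)

theorem innerStep_d (m : List (List Int)) (rows cols di dj : Int)
    (hdi : di = 1 ∨ di = -1) (hcols : 0 ≤ cols) (i : Int) (hi : 0 ≤ i) (hi2 : i < rows)
    (prev : Option (List Int × List Int)) (hprev : Hprev m rows cols di dj i prev)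
    (j0 : Int) (hj0 : 0 ≤ j0) (hjlt : j0 < cols) (cur : List Int) (b : Int) :
    innerStepB cols dj (m.getD i.toNat []) prev (cur, b) j0
      = (cur ++ [dpV m rows cols di dj i j0],
         if getCell m i j0 = 1 ∧ b < dpV m rows cols di dj i j0
         then dpV m rows cols di dj i j0 else b) := by
  have hrec := dpV_rec m rows cols di dj i j0 hdi hi hi2 hcols
  rcases hprev with ⟨rfl, hoob⟩ | ⟨pd, rfl, hin, hpd⟩
  · have hd : dpV m rows cols di dj i j0 = 1 := by
      rw [hrec, if_neg (fun h => hoob ⟨h.1, h.2.1⟩)]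
    rw [hd]
    rfl
  · by_cases hnj : j0 + dj < 0 ∨ cols ≤ j0 + dj
    · have hd : dpV m rows cols di dj i j0 = 1 := by
        rw [hrec, if_neg (by intro h; rcases hnj with h' | h' <;> omega)]
      rw [hd]
      simp only [innerStepB, if_pos hnj]
      rfl
    · replace hnj : 0 ≤ j0 + dj ∧ j0 + dj < cols := by omega
      have hdval : dpV m rows cols di dj i j0
          = (if getRow (m.getD (i+di).toNat []) (j0+dj)
                 = (if getRow (m.getD i.toNat []) j0 = 2 then (0:Int) else 2)
               ∧ 0 < dpV m rows cols di dj (i+di) (j0+dj)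
             then 1 + dpV m rows cols di dj (i+di) (j0+dj) else 0) := by
        rw [hrec, if_pos ⟨hin.1, hin.2, hnj.1, hnj.2⟩]
        rfl
      have ht : getRow pd (j0+dj) = dpV m rows cols di dj (i+di) (j0+dj) := hpd _ hnj.1 hnj.2
      simp only [innerStepB]
      rw [if_neg (by omega : ¬(j0 + dj < 0 ∨ cols ≤ j0 + dj)), ht, hdval]
      rfl

theorem innerRow (m : List (List Int)) (rows cols di dj : Int)
    (hdi : di = 1 ∨ di = -1) (hcols : 0 ≤ cols) (i : Int) (hi : 0 ≤ i) (hi2 : i < rows)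
    (prev : Option (List Int × List Int)) (hprev : Hprev m rows cols di dj i prev) :
    ∀ (fl : Nat) (j0 : Int), (cols - j0).toNat = fl → 0 ≤ j0 → j0 ≤ cols → ∀ b0 : Int, 0 ≤ b0 →
    (PySem.List.pyRange j0 cols 1).foldl (innerStepB cols dj (m.getD i.toNat []) prev)
        ((PySem.List.pyRange 0 j0 1).map (fun j => dpV m rows cols di dj i j), b0)
      = ((PySem.List.pyRange 0 cols 1).map (fun j => dpV m rows cols di dj i j),
         max b0 (isup (fun j => contrib m rows cols di dj i j) (PySem.List.pyRange j0 cols 1))) := by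
  intro fl
  induction fl with
  | zero =>
    intro j0 hfl hj0 hjle b0 hb0
    rw [show j0 = cols from by omega]
    rw [PySem.List.pyRange_one_eq_nil (le_refl cols)]
    simp only [List.foldl_nil]
    rw [show isup (fun j => contrib m rows cols di dj i j) ([] : List Int) = 0 from rfl]
    rw [max_eq_left hb0]
  | succ fl ih =>
    intro j0 hfl hj0 hjle b0 hb0
    have hlt : j0 < cols := by omega
    rw [PySem.List.pyRange_one_cons hlt, List.foldl_cons]
    rw [innerStep_d m rows cols di dj hdi hcols i hi hi2 prev hprev j0 hj0 hlt _ _]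
    have hmap : (PySem.List.pyRange 0 j0 1).map (fun j => dpV m rows cols di dj i j)
          ++ [dpV m rows cols di dj i j0]
        = (PySem.List.pyRange 0 (j0+1) 1).map (fun j => dpV m rows cols di dj i j) := by
      rw [PySem.List.pyRange_one_succ_right hj0, List.map_append]
      rfl
    have hbest : (if getCell m i j0 = 1 ∧ b0 < dpV m rows cols di dj i j0
          then dpV m rows cols di dj i j0 else b0)
        = max b0 (contrib m rows cols di dj i j0) := by
      by_cases hc : getCell m i j0 = 1
      · simp only [hc, true_and]
        unfold contrib
        rw [if_pos hc]
        by_cases h : b0 < dpV m rows cols di dj i j0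
        · rw [if_pos h, max_eq_right h.le]
        · rw [if_neg h, max_eq_left (by omega)]
      · rw [if_neg (fun h => hc h.1)]
        unfold contrib
        rw [if_neg hc, max_eq_left hb0]
    rw [hmap, hbest]
    rw [ih (j0+1) (by omega) (by omega) (by omega) _ (le_max_of_le_left hb0)]
    refine Prod.ext rfl ?_
    rw [isup_cons]
    exact max_assoc _ _ _

theorem outerB_asc (m : List (List Int)) (rows cols dj : Int) (hcols : 0 ≤ cols) :
    ∀ (fl : Nat) (i0 : Int), (rows - i0).toNat = fl → 0 ≤ i0 → i0 ≤ rows →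
    ∀ (b0 : Int) (prev : Option (List Int × List Int)), 0 ≤ b0 →
      Hprev m rows cols (-1) dj i0 prev →
    ((PySem.List.pyRange i0 rows 1).foldl (rowStepB m cols dj) (b0, prev)).1
      = max b0 (isup (fun i => isup (fun j => contrib m rows cols (-1) dj i j)
          (PySem.List.pyRange 0 cols 1)) (PySem.List.pyRange i0 rows 1)) := by
  intro fl
  induction fl with
  | zero =>
    intro i0 hfl h0 hle b0 prev hb0 hprev
    rw [PySem.List.pyRange_one_eq_nil (by omega : rows ≤ i0)]
    simp only [List.foldl_nil]
    rw [show isup (fun i => isup (fun j => contrib m rows cols (-1) dj i j)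
          (PySem.List.pyRange 0 cols 1)) ([] : List Int) = 0 from rfl]
    rw [max_eq_left hb0]
  | succ fl ih =>
    intro i0 hfl h0 hle b0 prev hb0 hprev
    have hlt : i0 < rows := by omega
    rw [PySem.List.pyRange_one_cons hlt, List.foldl_cons]
    have hrow := innerRow m rows cols (-1) dj (Or.inr rfl) hcols i0 h0 hlt prev hprev
      (cols - 0).toNat 0 rfl le_rfl hcols b0 hb0
    rw [show (PySem.List.pyRange 0 0 1).map (fun j => dpV m rows cols (-1) dj i0 j)
        = ([] : List Int) from by rw [PySem.List.pyRange_one_eq_nil (le_refl 0)]; rfl] at hrow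
    have hstep : rowStepB m cols dj (b0, prev) i0
        = (max b0 (isup (fun j => contrib m rows cols (-1) dj i0 j) (PySem.List.pyRange 0 cols 1)),
           some ((PySem.List.pyRange 0 cols 1).map (fun j => dpV m rows cols (-1) dj i0 j),
             m.getD i0.toNat [])) := by
      simp only [rowStepB]
      rw [hrow]
    rw [hstep]
    have hprev' : Hprev m rows cols (-1) dj (i0+1)
        (some ((PySem.List.pyRange 0 cols 1).map (fun j => dpV m rows cols (-1) dj i0 j),
          m.getD i0.toNat [])) := by
      right
      refine ⟨(PySem.List.pyRange 0 cols 1).map (fun j => dpV m rows cols (-1) dj i0 j),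
        ?_, ⟨by omega, by omega⟩, ?_⟩
      · rw [show i0 + 1 + (-1) = i0 from by omega]
      · intro j hj1 hj2
        rw [show i0 + 1 + (-1) = i0 from by omega]
        exact getRow_map _ cols j hj1 hj2
    rw [ih (i0+1) (by omega) (by omega) (by omega) _ _ (le_max_of_le_left hb0) hprev']
    rw [isup_cons]
    exact max_assoc _ _ _

theorem outerB_desc (m : List (List Int)) (rows cols dj : Int) (hcols : 0 ≤ cols) :
    ∀ (fl : Nat) (i0 : Int), (i0 + 1).toNat = fl → -1 ≤ i0 → i0 < rows →
    ∀ (b0 : Int) (prev : Option (List Int × List Int)), 0 ≤ b0 →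
      Hprev m rows cols 1 dj i0 prev →
    ((PySem.List.pyRange i0 (-1) (-1)).foldl (rowStepB m cols dj) (b0, prev)).1
      = max b0 (isup (fun i => isup (fun j => contrib m rows cols 1 dj i j)
          (PySem.List.pyRange 0 cols 1)) (PySem.List.pyRange i0 (-1) (-1))) := by
  intro fl
  induction fl with
  | zero =>
    intro i0 hfl h0 hle b0 prev hb0 hprev
    have : i0 = -1 := by omega
    subst this
    rw [PySem.List.pyRange_neg_one_eq_nil (le_refl (-1))]
    simp only [List.foldl_nil]
    rw [show isup (fun i => isup (fun j => contrib m rows cols 1 dj i j)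
          (PySem.List.pyRange 0 cols 1)) ([] : List Int) = 0 from rfl]
    rw [max_eq_left hb0]
  | succ fl ih =>
    intro i0 hfl h0 hle b0 prev hb0 hprev
    have h0' : 0 ≤ i0 := by omega
    rw [PySem.List.pyRange_neg_one_cons (by omega : (-1:Int) < i0), List.foldl_cons]
    have hrow := innerRow m rows cols 1 dj (Or.inl rfl) hcols i0 h0' hle prev hprev
      (cols - 0).toNat 0 rfl le_rfl hcols b0 hb0
    rw [show (PySem.List.pyRange 0 0 1).map (fun j => dpV m rows cols 1 dj i0 j)
        = ([] : List Int) from by rw [PySem.List.pyRange_one_eq_nil (le_refl 0)]; rfl] at hrow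
    have hstep : rowStepB m cols dj (b0, prev) i0
        = (max b0 (isup (fun j => contrib m rows cols 1 dj i0 j) (PySem.List.pyRange 0 cols 1)),
           some ((PySem.List.pyRange 0 cols 1).map (fun j => dpV m rows cols 1 dj i0 j),
             m.getD i0.toNat [])) := by
      simp only [rowStepB]
      rw [hrow]
    rw [hstep]
    have hprev' : Hprev m rows cols 1 dj (i0-1)
        (some ((PySem.List.pyRange 0 cols 1).map (fun j => dpV m rows cols 1 dj i0 j),
          m.getD i0.toNat [])) := by
      right
      refine ⟨(PySem.List.pyRange 0 cols 1).map (fun j => dpV m rows cols 1 dj i0 j),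
        ?_, ⟨by omega, by omega⟩, ?_⟩
      · rw [show i0 - 1 + 1 = i0 from by omega]
      · intro j hj1 hj2
        rw [show i0 - 1 + 1 = i0 from by omega]
        exact getRow_map _ cols j hj1 hj2
    rw [ih (i0-1) (by omega) (by omega) (by omega) _ _ (le_max_of_le_left hb0) hprev']
    rw [isup_cons]
    exact max_assoc _ _ _

theorem dirB_eq (m : List (List Int)) (rows cols di dj : Int)
    (hdi : di = 1 ∨ di = -1) (hcols : 0 ≤ cols) (hrows : 0 ≤ rows)
    (best0 : Int) (hb : 0 ≤ best0) :
    dirB m rows cols di dj best0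
      = max best0 (isup (fun i => isup (fun j => contrib m rows cols di dj i j)
          (PySem.List.pyRange 0 cols 1)) (PySem.List.pyRange 0 rows 1)) := by
  rcases hdi with rfl | rfl
  · simp only [dirB]
    rw [if_neg (by norm_num : ¬(1:Int) < 0)]
    rw [outerB_desc m rows cols dj hcols (rows - 1 + 1).toNat (rows - 1) rfl (by omega)
      (by omega) best0 none hb (Or.inl ⟨rfl, by omega⟩)]
    rw [show PySem.List.pyRange (rows-1) (-1) (-1) = (PySem.List.pyRange 0 rows 1).reverse from by
      rw [PySem.List.pyRange_neg_one_eq_reverse, show (-1:Int)+1 = 0 from by norm_num,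
        show rows - 1 + 1 = rows from by omega]]
    rw [isup_reverse]
  · simp only [dirB]
    rw [if_pos (by norm_num : (-1:Int) < 0)]
    exact outerB_asc m rows cols dj hcols (rows - 0).toNat 0 rfl le_rfl hrows best0 none hb
      (Or.inl ⟨rfl, by omega⟩)

-- ===== main theorem =====
theorem solution_spec : Claim_equal_solution := by
  intro matrix hdom hpre
  unfold Spec_solution
  cases matrix with
  | nil => rfl
  | cons r0 rest =>
    by_cases h0 : r0 = []
    · subst h0
      simp [solution, solution_alt]
    · have hrows1 : (0:Int) < ((r0 :: rest).length : Int) := by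
        simp
      have hcols0 : (0:Int) ≤ (r0.length : Int) := Int.natCast_nonneg _
      have hA : solution (r0 :: rest)
          = max 0 (isup (fun i => isup (fun j =>
              isup (fun d : Int × Int => checkPattern (r0 :: rest) i j d.1 d.2
                  ((r0 :: rest).length : Int) (r0.length : Int))
                [((-1 : Int), (1 : Int)), (-1, -1), (1, 1), (1, -1)])
              (PySem.List.pyRange 0 (r0.length : Int) 1))
            (PySem.List.pyRange 0 ((r0 :: rest).length : Int) 1)) := by
        simp only [solution, if_neg h0]
        refine foldl_max_general _ _ _ ?_ 0 le_rfl
        intro b i _ hb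
        refine foldl_max_general _ _ _ ?_ b hb
        intro b' j _ hb'
        exact foldl_max_general _ _ _ (fun b'' d _ _ => rfl) b' hb'
      have hB : solution_alt (r0 :: rest)
          = max 0 (isup (fun d : Int × Int => isup (fun i => isup (fun j =>
              contrib (r0 :: rest) ((r0 :: rest).length : Int) (r0.length : Int) d.1 d.2 i j)
                (PySem.List.pyRange 0 (r0.length : Int) 1))
              (PySem.List.pyRange 0 ((r0 :: rest).length : Int) 1))
            [((-1 : Int), (1 : Int)), (-1, -1), (1, 1), (1, -1)]) := by
        simp only [solution_alt, if_neg h0]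
        refine foldl_max_general _ _ _ ?_ 0 le_rfl
        intro b d hd hb
        have hdi : d.1 = 1 ∨ d.1 = -1 := by
          simp only [List.mem_cons, List.not_mem_nil, or_false] at hd
          rcases hd with rfl | rfl | rfl | rfl <;> norm_num
        exact dirB_eq (r0 :: rest) _ _ d.1 d.2 hdi hcols0 (le_of_lt hrows1) b hb
      rw [hA, hB]
      congr 1
      rw [isup_congr _ (fun i => isup (fun d : Int × Int => isup (fun j =>
            contrib (r0 :: rest) ((r0 :: rest).length : Int) (r0.length : Int) d.1 d.2 i j)
            (PySem.List.pyRange 0 (r0.length : Int) 1))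
          [((-1 : Int), (1 : Int)), (-1, -1), (1, 1), (1, -1)])
          (PySem.List.pyRange 0 ((r0 :: rest).length : Int) 1) ?_]
      · exact isup_swap (fun (i : Int) (d : Int × Int) => isup (fun j =>
          contrib (r0 :: rest) ((r0 :: rest).length : Int) (r0.length : Int) d.1 d.2 i j)
          (PySem.List.pyRange 0 (r0.length : Int) 1))
          (PySem.List.pyRange 0 ((r0 :: rest).length : Int) 1)
          [((-1 : Int), (1 : Int)), (-1, -1), (1, 1), (1, -1)]
      · intro i hi
        have hmi := PySem.List.mem_pyRange_one.mp hi
        rw [show (fun j => isup (fun d : Int × Int => checkPattern (r0 :: rest) i j d.1 d.2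
            ((r0 :: rest).length : Int) (r0.length : Int))
            [((-1 : Int), (1 : Int)), (-1, -1), (1, 1), (1, -1)])
          = (fun j => isup (fun d : Int × Int => contrib (r0 :: rest) ((r0 :: rest).length : Int)
              (r0.length : Int) d.1 d.2 i j)
            [((-1 : Int), (1 : Int)), (-1, -1), (1, 1), (1, -1)]) from funext (fun j =>
          isup_congr _ _ _ (fun d hd => by
            have hdi : d.1 = 1 ∨ d.1 = -1 := by
              simp only [List.mem_cons, List.not_mem_nil, or_false] at hd
              rcases hd with rfl | rfl | rfl | rfl <;> norm_num
            exact checkPattern_eq (r0 :: rest) _ _ d.1 d.2 i j hdi hmi.1 hmi.2 hcols0))]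
        exact isup_swap (fun (j : Int) (d : Int × Int) => contrib (r0 :: rest) ((r0 :: rest).length : Int)
          (r0.length : Int) d.1 d.2 i j) (PySem.List.pyRange 0 (r0.length : Int) 1)
          [((-1 : Int), (1 : Int)), (-1, -1), (1, 1), (1, -1)]
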